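-- pv_equiv track=rewrite | github.com/domse31/deepresearch | deepresearch/utils.py | deduplicate_and_format_sources
-- ===== SOURCE A (Python) =====
-- from typing import List, Dict, Any, Optional
--
-- def deduplicate_and_format_sources(sources: List[Dict[str, str]],
--                                   max_tokens_per_source: int = 1000) -> str:
--     """Deduplicate sources and format them for the model.
--
--     Args:
--         sources: List of sources with title, content, and url
--         max_tokens_per_source: Maximum tokens per source to include
--
--     Returns:
--         Formatted string with sources content
--     """
--     seen_urls = set()
--     unique_sources = []
--
--     for source in sources:
--         url = source.get("url", "")
--         if url and url not in seen_urls: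
--             seen_urls.add(url)
--             unique_sources.append(source)
--
--     formatted_sources = []
--     for i, source in enumerate(unique_sources, 1):
--         title = source.get("title", "")
--         content = source.get("content", "")
--         url = source.get("url", "")
--
--         # Truncate content if needed based on rough token estimate
--         if content and len(content) > max_tokens_per_source * 4:  # Rough char to token ratio
--             content = content[:max_tokens_per_source * 4] + "..."
--
--         formatted_source = f"SOURCE {i}:\nTitle: {title}\nURL: {url}\nContent: {content}\n"
--         formatted_sources.append(formatted_source)
--
--     return "\n\n".join(formatted_sources)
-- ===== SOURCE B (Python) =====
-- def deduplicate_and_format_sources(sources, max_tokens_per_source=1000):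
--     """Index-based re-implementation: map each url to the position of its first
--     occurrence, sort those positions, then format the sources fetched by index."""
--     first = {}
--     for i, source in enumerate(sources):
--         url = source.get("url", "")
--         if url:
--             first.setdefault(url, i)
--     blocks = []
--     for n, i in enumerate(sorted(first.values()), 1):
--         source = sources[i]
--         title = source.get("title", "")
--         content = source.get("content", "")
--         url = source.get("url", "")
--         if content and len(content) > max_tokens_per_source * 4:
--             content = content[:max_tokens_per_source * 4] + "..."
--         blocks.append(f"SOURCE {n}:\nTitle: {title}\nURL: {url}\nContent: {content}\n")
--     return "\n\n".join(blocks)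
-- ===== Notes on version B (the rewrite author's own statement) =====
-- stated objective: alternative
-- what changed: B replaces A's seen-set filter pass with a dict mapping each url to the index of its first occurrence (setdefault), then sorts those indices and formats the sources fetched back from the original list by index, instead of ever building a filtered unique_sources list.
import Mathlib
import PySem

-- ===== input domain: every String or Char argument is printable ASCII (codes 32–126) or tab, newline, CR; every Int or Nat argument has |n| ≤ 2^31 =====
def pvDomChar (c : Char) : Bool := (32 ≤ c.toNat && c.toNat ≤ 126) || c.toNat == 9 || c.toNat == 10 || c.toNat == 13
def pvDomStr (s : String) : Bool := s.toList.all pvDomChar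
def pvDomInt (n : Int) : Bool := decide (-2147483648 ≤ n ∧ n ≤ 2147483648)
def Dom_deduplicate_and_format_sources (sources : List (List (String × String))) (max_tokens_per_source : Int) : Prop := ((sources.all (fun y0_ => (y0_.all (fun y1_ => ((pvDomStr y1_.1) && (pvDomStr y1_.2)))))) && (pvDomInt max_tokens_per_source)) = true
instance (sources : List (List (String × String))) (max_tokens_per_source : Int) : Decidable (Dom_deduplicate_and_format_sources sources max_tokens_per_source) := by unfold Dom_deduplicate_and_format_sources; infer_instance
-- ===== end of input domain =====

-- B replaces A's seen-set filter pass with a url→first-occurrence-index dict; it sorts those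
-- indices and formats the sources fetched back by index (objective: alternative, same cost).

-- shared helper: Python's source.get(key, default) on the association-list dict (first match)
def pvGet (d : List (String × String)) (k dflt : String) : String :=
  (List.lookup k d).getD dflt

-- shared helper: the truncation + f-string both Pythons perform verbatim
def pvFormat (i : Int) (title url content : String) (m : Int) : String :=
  let content :=
    if content ≠ "" ∧ m * 4 < (content.toList.length : Int) then
      PySem.Str.slice content none (some (m * 4)) ++ "..."
    else content
  "SOURCE " ++ PySem.Int.toStr i ++ ":\nTitle: " ++ title ++ "\nURL: " ++ url
    ++ "\nContent: " ++ content ++ "\n"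

-- ===== PORT A =====
-- A's first loop: build unique_sources
def pvDedupLoopA : List (List (String × String)) → PySem.Set String → List (List (String × String)) → List (List (String × String))
  | [], _, uniq => uniq
  | s :: rest, seen, uniq =>
    let url := pvGet s "url" ""
    if url ≠ "" ∧ url ∉ seen then
      pvDedupLoopA rest (PySem.Set.add seen url) (uniq ++ [s])
    else
      pvDedupLoopA rest seen uniq

-- A's second loop: for i, source in enumerate(unique_sources, 1)
def pvFormatLoopA (m : Int) : List (List (String × String)) → Int → List String → List String
  | [], _, acc => acc
  | s :: rest, i, acc =>
    pvFormatLoopA m rest (i + 1)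
      (acc ++ [pvFormat i (pvGet s "title" "") (pvGet s "url" "") (pvGet s "content" "") m])

def deduplicate_and_format_sources (sources : List (List (String × String))) (max_tokens_per_source : Int) : String :=
  PySem.Str.join "\n\n" (pvFormatLoopA max_tokens_per_source (pvDedupLoopA sources PySem.Set.empty []) 1 [])

-- ===== PORT B =====
-- B's first loop: for i, source in enumerate(sources): if url: first.setdefault(url, i)
def pvBuildFirstB : List (List (String × String)) → Int → PySem.Dict String Int → PySem.Dict String Int
  | [], _, first => first
  | s :: rest, i, first =>
    let url := pvGet s "url" ""
    pvBuildFirstB rest (i + 1) (if url ≠ "" then first.setdefault url i else first)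

-- B's sources[i]; the index comes from enumerate, so it is always in range (the default only totalizes)
def pvFetchB (sources : List (List (String × String))) (i : Int) : List (String × String) :=
  (PySem.List.pyGet? sources i).getD []

-- B's second loop: for n, i in enumerate(sorted(first.values()), 1)
def pvFormatLoopB (sources : List (List (String × String))) (m : Int) : List Int → Int → List String → List String
  | [], _, out => out
  | i :: rest, n, out =>
    let s := pvFetchB sources i
    pvFormatLoopB sources m rest (n + 1)
      (out ++ [pvFormat n (pvGet s "title" "") (pvGet s "url" "") (pvGet s "content" "") m])

def deduplicate_and_format_sources_alt (sources : List (List (String × String))) (max_tokens_per_source : Int) : String :=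
  PySem.Str.join "\n\n"
    (pvFormatLoopB sources max_tokens_per_source
      (PySem.List.sorted (PySem.Dict.values (pvBuildFirstB sources 0 PySem.Dict.empty)) (fun x => x) false)
      1 [])

-- ===== PRECONDITION & SPEC =====
def Spec_deduplicate_and_format_sources (sources : List (List (String × String))) (max_tokens_per_source : Int) (out : String) : Prop := out = deduplicate_and_format_sources_alt sources max_tokens_per_source
instance (sources : List (List (String × String))) (max_tokens_per_source : Int) (out : String) : Decidable (Spec_deduplicate_and_format_sources sources max_tokens_per_source out) := by unfold Spec_deduplicate_and_format_sources; infer_instance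

-- ===== CLAIM (what is proved, stated in full; the proofs are below) =====
def Claim_equal_deduplicate_and_format_sources : Prop := ∀ (sources : List (List (String × String))) (max_tokens_per_source : Int), Dom_deduplicate_and_format_sources sources max_tokens_per_source → Spec_deduplicate_and_format_sources sources max_tokens_per_source (deduplicate_and_format_sources sources max_tokens_per_source)

-- ===== LEMMAS AND PROOFS =====

-- B's format loop over a list of indices is A's format loop over the fetched sources
theorem pvFormatLoopB_eq_A (sources : List (List (String × String))) (m : Int) :
    ∀ (idxs : List Int) (n : Int) (out : List String),
    pvFormatLoopB sources m idxs n out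
      = pvFormatLoopA m (idxs.map (pvFetchB sources)) n out := by
  intro idxs
  induction idxs with
  | nil => intro n out; simp [pvFormatLoopB, pvFormatLoopA]
  | cons i rest ih => intro n out; simp [pvFormatLoopB, pvFormatLoopA, ih]

-- the dict-of-first-indices loop, fetched back into sources, is A's dedup loop
theorem pvBuildFirstB_eq_dedup (sources : List (List (String × String))) :
    ∀ (rest : List (List (String × String))) (k : Nat) (seen : PySem.Set String)
      (d : PySem.Dict String Int),
    rest = sources.drop k →
    (∀ u, u ∈ seen ↔ u ∈ d.keys) →
    (∀ v ∈ d.values, 0 ≤ v ∧ v < (k : Int)) →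
    d.values.Pairwise (· < ·) →
    ((pvBuildFirstB rest (k : Int) d).values.map (pvFetchB sources)
        = pvDedupLoopA rest seen (d.values.map (pvFetchB sources)))
      ∧ (pvBuildFirstB rest (k : Int) d).values.Pairwise (· < ·) := by
  intro rest
  induction rest with
  | nil => intro k seen d _ _ _ hpw; simpa [pvBuildFirstB, pvDedupLoopA]
  | cons s rest' ih =>
    intro k seen d hdrop hmem hbnd hpw
    have hk : sources[k]? = some s := by
      have h0 : (sources.drop k)[0]? = some s := by rw [← hdrop]; rfl
      rw [List.getElem?_drop] at h0
      simpa using h0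
    have hrest' : rest' = sources.drop (k + 1) := by
      have h1 : sources.drop (k + 1) = (sources.drop k).drop 1 := by
        rw [List.drop_drop]
      rw [h1, ← hdrop]
      simp
    have hcast : ((k : Int) + 1) = ((k + 1 : Nat) : Int) := by push_cast; ring
    have hbnd1 : ∀ v ∈ d.values, 0 ≤ v ∧ v < ((k + 1 : Nat) : Int) := by
      intro v hv
      have := hbnd v hv
      push_cast
      omega
    simp only [pvBuildFirstB, pvDedupLoopA]
    by_cases hurl : pvGet s "url" "" = ""
    · -- empty url: both loops skip
      rw [if_neg (by simp [hurl]), if_neg (by simp [hurl]), hcast]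
      exact ih (k + 1) seen d hrest' hmem hbnd1 hpw
    · rw [if_pos hurl]
      cases hcont : d.contains (pvGet s "url" "") with
      | true =>
        -- already seen: A skips; B's setdefault is a no-op
        have hseen : pvGet s "url" "" ∈ seen :=
          (hmem _).mpr ((PySem.Dict.contains_iff_mem_keys d _).mp hcont)
        rw [PySem.Dict.setdefault_of_contains _ _ hcont, if_neg (by simp [hseen]), hcast]
        exact ih (k + 1) seen d hrest' hmem hbnd1 hpw
      | false =>
        -- new url: A appends the source, B inserts index k at the end of the dict
        have hseen : pvGet s "url" "" ∉ seen := by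
          intro h
          have := (PySem.Dict.contains_iff_mem_keys d _).mpr ((hmem _).mp h)
          rw [hcont] at this
          exact Bool.false_ne_true this
        have hitems : (d.setdefault (pvGet s "url" "") (k : Int)).items
            = d.items ++ [(pvGet s "url" "", (k : Int))] := by
          rw [PySem.Dict.setdefault_of_not_contains _ _ hcont]
          exact PySem.Dict.items_insert_of_not_contains d _ hcont
        have hvals : (d.setdefault (pvGet s "url" "") (k : Int)).values
            = d.values ++ [(k : Int)] := by
          simp only [PySem.Dict.values, hitems, List.map_append, List.map_cons, List.map_nil]
        have hkeys : (d.setdefault (pvGet s "url" "") (k : Int)).keys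
            = d.keys ++ [pvGet s "url" ""] := by
          simp only [PySem.Dict.keys, hitems, List.map_append, List.map_cons, List.map_nil]
        rw [if_pos ⟨hurl, hseen⟩, hcast]
        have hmem' : ∀ u, u ∈ PySem.Set.add seen (pvGet s "url" "")
            ↔ u ∈ (d.setdefault (pvGet s "url" "") (k : Int)).keys := by
          intro u
          rw [hkeys, PySem.Set.mem_add]
          simp [hmem u, or_comm]
        have hbnd' : ∀ v ∈ (d.setdefault (pvGet s "url" "") (k : Int)).values,
            0 ≤ v ∧ v < ((k + 1 : Nat) : Int) := by
          intro v hv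
          rw [hvals] at hv
          rcases List.mem_append.mp hv with h | h
          · exact hbnd1 v h
          · simp at h; subst h; push_cast; omega
        have hpw' : (d.setdefault (pvGet s "url" "") (k : Int)).values.Pairwise (· < ·) := by
          rw [hvals]
          refine List.pairwise_append.mpr ⟨hpw, List.pairwise_singleton _ _, ?_⟩
          intro v hv w hw
          simp at hw; subst hw
          exact (hbnd v hv).2
        have ihres := ih (k + 1) (PySem.Set.add seen (pvGet s "url" "")) _ hrest' hmem' hbnd' hpw'
        refine ⟨?_, ihres.2⟩
        rw [ihres.1, hvals]
        have hfetch : pvFetchB sources (k : Int) = s := by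
          simp [pvFetchB, PySem.List.pyGet?_natCast, hk]
        simp [hfetch]

-- ===== VERDICT (by name: the statement is the Claim_ definition above) =====
theorem deduplicate_and_format_sources_spec : Claim_equal_deduplicate_and_format_sources := by
  intro sources m _
  unfold Spec_deduplicate_and_format_sources
  unfold deduplicate_and_format_sources deduplicate_and_format_sources_alt
  have hv0 : (PySem.Dict.empty : PySem.Dict String Int).values = [] := rfl
  have hk0 : (PySem.Dict.empty : PySem.Dict String Int).keys = [] := rfl
  have h := pvBuildFirstB_eq_dedup sources sources 0 PySem.Set.empty PySem.Dict.empty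
    (by simp) (by intro u; rw [hk0]; simp [PySem.Set.empty])
    (by rw [hv0]; simp) (by rw [hv0]; exact List.Pairwise.nil)
  simp only [Nat.cast_zero, hv0, List.map_nil] at h
  have hsorted : PySem.List.sorted ((pvBuildFirstB sources 0 PySem.Dict.empty).values) (fun x => x) false
      = (pvBuildFirstB sources 0 PySem.Dict.empty).values :=
    PySem.List.sorted_eq_self_of_pairwise _ _ (h.2.imp (fun hab => le_of_lt hab))
  rw [pvFormatLoopB_eq_A, hsorted, ← h.1]
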